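-- pv_equiv track=rewrite | github.com/dimgatz98/coding_challenges | hackerrank/reverse_shuffle_merge/python/reverse_shuffle1.py | count_occurencies
-- ===== SOURCE A (Python) =====
-- def count_occurencies(s):
--     count = {}
--
--     for i, letter in enumerate(s):
--         if letter not in count:
--             count[letter] = [i]
--             continue
--         count[letter].append(i)
--
--     return count
-- ===== SOURCE B (Python) =====
-- def count_occurencies(s):
--     distinct = list(dict.fromkeys(s))
--     return {c: [i for i, ch in enumerate(s) if ch == c] for c in distinct}
-- ===== Notes on version B (the rewrite author's own statement) =====
-- stated objective: alternative
-- what changed: B first collects the distinct characters (dict.fromkeys) and then builds the dict by a comprehension that, for each distinct character, rescans enumerate(s) for its indices, inverting A's single-pass bucket-appending loop.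
import Mathlib
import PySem

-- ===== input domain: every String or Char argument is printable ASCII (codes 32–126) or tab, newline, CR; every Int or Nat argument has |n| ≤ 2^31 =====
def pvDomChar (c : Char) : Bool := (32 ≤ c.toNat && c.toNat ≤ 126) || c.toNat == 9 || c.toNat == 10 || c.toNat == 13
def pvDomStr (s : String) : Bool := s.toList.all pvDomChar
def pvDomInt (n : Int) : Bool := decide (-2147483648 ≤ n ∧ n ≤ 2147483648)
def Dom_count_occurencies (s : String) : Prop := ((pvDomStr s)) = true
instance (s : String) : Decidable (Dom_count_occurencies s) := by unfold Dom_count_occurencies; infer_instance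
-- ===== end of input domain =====

-- B replaces A's single-pass bucket-appending loop by: distinct characters first, then one rescan of
-- enumerate(s) per distinct character (an alternative decomposition, not faster).

-- ===== PORT A =====
-- single pass: append each index i to the bucket of its letter (new letters start a fresh bucket)
def count_occurencies (s : String) : List (String × List Int) :=
  ((PySem.List.enumerate s.toList 0).foldl
    (fun (count : PySem.Dict String (List Int)) (p : Int × Char) =>
      if count.contains (String.ofList [p.2]) = false then count.insert (String.ofList [p.2]) [p.1]
      else count.modify (String.ofList [p.2]) [] (fun l => l ++ [p.1]))
    PySem.Dict.empty).items

-- ===== PORT B =====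
-- distinct characters first (dict.fromkeys), then one scan of enumerate(s) per distinct character
def count_occurencies_alt (s : String) : List (String × List Int) :=
  (PySem.List.dedup s.toList).map
    (fun c => (String.ofList [c],
      ((PySem.List.enumerate s.toList 0).filter (fun p => p.2 == c)).map (fun p => p.1)))

-- ===== PRECONDITION & SPEC =====
def Spec_count_occurencies (s : String) (out : List (String × List Int)) : Prop := out = count_occurencies_alt s
instance (s : String) (out : List (String × List Int)) : Decidable (Spec_count_occurencies s out) := by unfold Spec_count_occurencies; infer_instance

-- ===== CLAIM (what is proved, stated in full; the proofs are below) =====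
def Claim_equal_count_occurencies : Prop := ∀ (s : String), Dom_count_occurencies s → Spec_count_occurencies s (count_occurencies s)

-- ===== LEMMAS AND PROOFS =====

theorem pv_modify_of_not_contains {κ ν : Type} [BEq κ] [LawfulBEq κ] (d : PySem.Dict κ ν)
    (k : κ) (dflt : ν) (f : ν → ν) (h : d.contains k = false) :
    d.modify k dflt f = d.insert k (f dflt) := by
  have h2 : d.getD k dflt = dflt := PySem.Dict.getD_of_not_contains d dflt h
  simp [PySem.Dict.modify, h, PySem.Dict.getD] at h2 ⊢
  rw [h2]

-- A's branching step is extensionally the canonical grouping step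
theorem pv_step_eq :
    (fun (count : PySem.Dict String (List Int)) (p : Int × Char) =>
      if count.contains (String.ofList [p.2]) = false then count.insert (String.ofList [p.2]) [p.1]
      else count.modify (String.ofList [p.2]) [] (fun l => l ++ [p.1]))
    = (fun (count : PySem.Dict String (List Int)) (p : Int × Char) =>
      count.modify (String.ofList [p.2]) [] (fun l => l ++ [p.1])) := by
  funext d p
  by_cases h : d.contains (String.ofList [p.2]) = false
  · simp [h, pv_modify_of_not_contains d _ _ _ h]
  · simp [h]

theorem pv_ofList_map {α β : Type} [BEq α] [LawfulBEq α] [BEq β] [LawfulBEq β]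
    (f : α → β) (hf : Function.Injective f) (xs : List α) :
    PySem.Set.ofList (xs.map f) = (PySem.Set.ofList xs).map f := by
  have key : ∀ (s : PySem.Set α), (xs.map f).foldl PySem.Set.add (s.map f)
      = (xs.foldl PySem.Set.add s).map f := by
    induction xs with
    | nil => intro s; rfl
    | cons x xs ih =>
      intro s
      have hadd : PySem.Set.add (s.map f) (f x) = (PySem.Set.add s x).map f := by
        simp only [PySem.Set.add, List.contains_iff_mem, List.mem_map, hf.eq_iff,
          exists_eq_right, decide_eq_true_eq]
        split_ifs with h1 h2 h2 <;> simp_all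
      simp only [List.map_cons, List.foldl_cons, hadd]
      exact ih (PySem.Set.add s x)
  simpa [PySem.Set.ofList_eq_foldl] using key []

theorem pv_mk1_inj : Function.Injective (fun c : Char => String.ofList [c]) := by
  intro a b h
  have h2 := congrArg String.toList h
  simpa [String.toList_ofList] using h2

-- ===== VERDICT (by name: the statement is the Claim_ definition above) =====
theorem count_occurencies_spec : Claim_equal_count_occurencies := by
  intro s _
  show count_occurencies s = count_occurencies_alt s
  unfold count_occurencies count_occurencies_alt
  rw [pv_step_eq]
  set l := PySem.List.enumerate s.toList 0 with hl
  set mk1 : Char → String := fun c => String.ofList [c] with hmk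
  -- rewrite the fold as the canonical key-value grouping fold over l.map g
  have hfold : l.foldl
      (fun (count : PySem.Dict String (List Int)) (p : Int × Char) =>
        count.modify (mk1 p.2) [] (fun v => v ++ [p.1])) PySem.Dict.empty
    = (l.map (fun p => (mk1 p.2, p.1))).foldl
      (fun (d : PySem.Dict String (List Int)) (q : String × Int) => d.modify q.1 [] (fun v => v ++ [q.2]))
      PySem.Dict.empty := by
    rw [List.foldl_map]
  rw [hfold]
  set D := (l.map (fun p => (mk1 p.2, p.1))).foldl
      (fun (d : PySem.Dict String (List Int)) (q : String × Int) => d.modify q.1 [] (fun v => v ++ [q.2]))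
      PySem.Dict.empty with hD
  have hnodup : D.keys.Nodup := by
    rw [hD]
    exact PySem.Dict.nodup_keys_foldl_modify_key _ (fun q : String × Int => q.1) [] (fun _ q (v : List Int) => v ++ [q.2]) _
      (by simp [PySem.Dict.keys_empty])
  have hkeys : D.keys = (PySem.List.dedup s.toList).map mk1 := by
    rw [hD, PySem.Dict.keys_foldl_modify_key _ (fun q : String × Int => q.1) [] (fun _ q (v : List Int) => v ++ [q.2])]
    have : (l.map (fun p => (mk1 p.2, p.1))).map (fun q => q.1) = (l.map (fun p => p.2)).map mk1 := by
      simp [List.map_map, Function.comp]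
    rw [this, PySem.List.map_snd_enumerate]
    rw [PySem.List.dedup_eq_ofList, ← pv_ofList_map mk1 pv_mk1_inj]
    simp [PySem.Dict.keys_empty, PySem.Set.update, PySem.Set.ofList_eq_foldl]
  have hgetD : ∀ c : Char, D.getD (mk1 c) []
      = (l.filter (fun p => p.2 == c)).map (fun p => p.1) := by
    intro c
    rw [hD, PySem.Dict.getD_foldl_modify_append]
    rw [List.filter_map]
    have hpred : ((fun q : String × Int => q.1 == mk1 c) ∘ (fun p : Int × Char => (mk1 p.2, p.1)))
        = (fun p : Int × Char => p.2 == c) := by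
      funext p
      simp only [Function.comp]
      by_cases h : p.2 = c
      · simp [h]
      · have h2 : ¬ mk1 p.2 = mk1 c := fun hx => h (pv_mk1_inj hx)
        simp [h, h2]
    rw [hpred]
    simp [PySem.Dict.getD_empty, List.map_map, Function.comp]
  rw [PySem.Dict.items_eq_map_keys D hnodup [], hkeys, List.map_map]
  refine List.map_congr_left ?_
  intro c _
  simp only [Function.comp, Prod.mk.injEq]
  exact ⟨rfl, hgetD c⟩
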